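-- pv_equiv track=rewrite | github.com/sjhhh321/EGQR | mutator/pattern_transformer.py | __pattern2list
-- ===== SOURCE A (Python) =====
-- def __pattern2list(pattern):
--     patterns, result, isolated_nodes = pattern.split(","), [], []
--     for pattern in patterns:
--         pattern = pattern.strip(" ")
--         pattern = pattern.strip("\n")
--         v1, r, v2 = "", "", ""
--         edge_counter = 0
--         for i in range(0, len(pattern)):
--             if not (v1.endswith(")")):
--                 v1 = v1 + pattern[i]
--             elif pattern[i] == "(" or v2 != "":
--                 v2 = v2 + pattern[i]
--                 if pattern[i] == ")":
--                     result.append((v1, r, v2))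
--                     v1, r, v2 = v2, "", ""
--                     edge_counter += 1
--             else:
--                 r = r + pattern[i]
--         if edge_counter == 0 and len(v1) > 0:
--             isolated_nodes.append(v1)
--     # logger.debug(result)
--     # logger.debug(isolated_nodes)
--     return result, isolated_nodes
-- ===== SOURCE B (Python) =====
-- def __pattern2list(pattern):
--     result, isolated_nodes = [], []
--     for piece in pattern.split(","):
--         piece = piece.strip(" ").strip("\n")
--         head, sep, rest = piece.partition(")")
--         node = head + sep
--         count = 0
--         while True:
--             pre, op, post = rest.partition("(")
--             if not op:
--                 break
--             mid, cl, post2 = post.partition(")")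
--             if not cl:
--                 break
--             node2 = "(" + mid + ")"
--             result.append((node, pre, node2))
--             node, rest = node2, post2
--             count += 1
--         if count == 0 and len(node) > 0:
--             isolated_nodes.append(node)
--     return result, isolated_nodes
-- ===== Notes on version B (the rewrite author's own statement) =====
-- stated objective: faster
-- what changed: Replaced the per-character three-register state machine (with an endswith test and a string concatenation on every character) by a slice-based loop that uses str.partition to cut the head node and then each edge-label/node slice off the remainder in one step.
import Mathlib
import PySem

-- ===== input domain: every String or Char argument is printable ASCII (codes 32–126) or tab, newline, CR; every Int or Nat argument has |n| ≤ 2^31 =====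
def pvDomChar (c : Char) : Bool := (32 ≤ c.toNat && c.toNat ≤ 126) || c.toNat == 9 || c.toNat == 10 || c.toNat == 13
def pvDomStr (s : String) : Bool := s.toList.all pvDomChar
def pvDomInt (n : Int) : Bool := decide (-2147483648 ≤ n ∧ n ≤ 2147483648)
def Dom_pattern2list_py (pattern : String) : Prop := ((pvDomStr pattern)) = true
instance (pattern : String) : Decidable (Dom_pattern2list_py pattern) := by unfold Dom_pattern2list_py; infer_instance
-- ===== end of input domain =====

-- B replaces A's per-character three-register state machine by a partition-into-slices loop
-- (str.partition on ")" and "("); measured faster (no per-character string building); same exact behaviour.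

-- ===== PORT A =====
-- inner 'for i in range(0, len(pattern))' loop of A, carried state (v1, r, v2, result, edge_counter);
-- iterating i over the indices and reading pattern[i] is iterating over the characters in order.
def loopA : List Char → List Char → List Char → List Char →
    List (List Char × List Char × List Char) → Int →
    List (List Char × List Char × List Char) × List Char × Int
  | [], v1, _r, _v2, res, ec => (res, v1, ec)
  | c :: rest, v1, r, v2, res, ec =>
    if ¬ (PySem.Chars.endswith v1 [')'] = true) then
      loopA rest (v1 ++ [c]) r v2 res ec
    else if c = '(' ∨ v2 ≠ [] then
      let v2' := v2 ++ [c]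
      if c = ')' then
        loopA rest v2' [] [] (res ++ [(v1, r, v2')]) (ec + 1)
      else
        loopA rest v1 r v2' res ec
    else
      loopA rest v1 (r ++ [c]) v2 res ec

-- body of A's outer 'for pattern in patterns' loop (strip, run the machine, record isolated node)
def stepA (acc : List (List Char × List Char × List Char) × List (List Char)) (p : List Char) :
    List (List Char × List Char × List Char) × List (List Char) :=
  let cs := PySem.Chars.stripChars (PySem.Chars.stripChars p [' ']) ['\n']
  let m := loopA cs [] [] [] acc.1 0
  (m.1, if m.2.2 = 0 ∧ 0 < m.2.1.length then acc.2 ++ [m.2.1] else acc.2)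

def pattern2list_py (pattern : String) : (List (String × String × String)) × List String :=
  let patterns := PySem.Chars.splitOn pattern.toList [',']
  let st := patterns.foldl stepA ([], [])
  (st.1.map (fun t => (String.ofList t.1, String.ofList t.2.1, String.ofList t.2.2)),
   st.2.map (fun s => String.ofList s))

-- ===== PORT B =====
-- hand port of str.partition(t) for a single-character separator t (PySem has no partition):
-- exact: returns (part before first t, [t], part after) or (s, [], []) when t does not occur.
def pyPartition1 (t : Char) : List Char → List Char × List Char × List Char
  | [] => ([], [], [])
  | c :: cs =>
    if c = t then ([], [t], cs)
    else
      let m := pyPartition1 t cs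
      (c :: m.1, m.2.1, m.2.2)

theorem pyPartition1_sep_length (t : Char) : ∀ cs : List Char,
    (pyPartition1 t cs).2.1 ≠ [] → (pyPartition1 t cs).2.2.length < cs.length := by
  intro cs
  induction cs with
  | nil => simp [pyPartition1]
  | cons c cs ih =>
    by_cases h : c = t
    · simp [pyPartition1, h]
    · simp only [pyPartition1, if_neg h]
      intro hne
      exact Nat.lt_trans (ih hne) (Nat.lt_succ_self _)

-- the 'while True' loop of B: cut the next "(...)" slice off rest, emit, repeat
def loopB (node rest : List Char) (res : List (List Char × List Char × List Char)) (count : Int) :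
    List (List Char × List Char × List Char) × List Char × Int :=
  match h1 : pyPartition1 '(' rest with
  | (pre, op, post) =>
    if hop : op = [] then (res, node, count)
    else
      match h2 : pyPartition1 ')' post with
      | (mid, cl, post2) =>
        if hcl : cl = [] then (res, node, count)
        else
          let node2 := '(' :: (mid ++ [')'])
          loopB node2 post2 (res ++ [(node, pre, node2)]) (count + 1)
termination_by rest.length
decreasing_by
  have hp1 : (pyPartition1 '(' rest).2.2.length < rest.length := by
    apply pyPartition1_sep_length
    rw [h1]; exact hop
  have hp2 : (pyPartition1 ')' post).2.2.length < post.length := by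
    apply pyPartition1_sep_length
    rw [h2]; exact hcl
  rw [h1] at hp1
  rw [h2] at hp2
  exact Nat.lt_trans hp2 hp1

-- body of B's outer loop: split the head node off with partition(")"), then run the slice loop
def stepB (acc : List (List Char × List Char × List Char) × List (List Char)) (p : List Char) :
    List (List Char × List Char × List Char) × List (List Char) :=
  let cs := PySem.Chars.stripChars (PySem.Chars.stripChars p [' ']) ['\n']
  let h := pyPartition1 ')' cs
  let node := h.1 ++ h.2.1
  let m := loopB node h.2.2 acc.1 0
  (m.1, if m.2.2 = 0 ∧ m.2.1 ≠ [] then acc.2 ++ [m.2.1] else acc.2)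

def pattern2list_py_alt (pattern : String) : (List (String × String × String)) × List String :=
  let patterns := PySem.Chars.splitOn pattern.toList [',']
  let st := patterns.foldl stepB ([], [])
  (st.1.map (fun t => (String.ofList t.1, String.ofList t.2.1, String.ofList t.2.2)),
   st.2.map (fun s => String.ofList s))

-- ===== PRECONDITION & SPEC =====
def Spec_pattern2list_py (pattern : String) (out : (List (String × String × String)) × List String) : Prop := out = pattern2list_py_alt pattern
instance (pattern : String) (out : (List (String × String × String)) × List String) : Decidable (Spec_pattern2list_py pattern out) := by unfold Spec_pattern2list_py; infer_instance

-- ===== CLAIM (what is proved, stated in full; the proofs are below) =====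
def Claim_equal_pattern2list_py : Prop := ∀ (pattern : String), Dom_pattern2list_py pattern → Spec_pattern2list_py pattern (pattern2list_py pattern)

-- ===== LEMMAS AND PROOFS =====

theorem endswith_append_singleton (v1 : List Char) (c d : Char) :
    PySem.Chars.endswith (v1 ++ [c]) [d] = (c == d) := by
  by_cases h : c = d
  · subst h; simp [PySem.Chars.endswith_iff]
  · have hs : ¬ ([d] <:+ v1 ++ [c]) := by
      rintro ⟨t, ht⟩
      have h2 := congrArg List.getLast? ht
      simp at h2
      exact h h2.symm
    rw [show (c == d) = false from by simp [h], Bool.eq_false_iff]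
    intro htrue
    exact hs ((PySem.Chars.endswith_iff _ _).mp htrue)

-- phase 1 of A's machine: v1 swallows characters up to and including the first ')'
theorem phase1 (cs : List Char) : ∀ (v1 r v2 : List Char) res ec,
    PySem.Chars.endswith v1 [')'] = false →
    loopA cs v1 r v2 res ec =
      (if (pyPartition1 ')' cs).2.1 = [] then (res, v1 ++ (pyPartition1 ')' cs).1, ec)
       else loopA (pyPartition1 ')' cs).2.2 (v1 ++ ((pyPartition1 ')' cs).1 ++ [')'])) r v2 res ec) := by
  induction cs with
  | nil => intro v1 r v2 res ec _; simp [loopA, pyPartition1]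
  | cons c cs ih =>
    intro v1 r v2 res ec h
    by_cases hc : c = ')'
    · subst hc
      simp [loopA, h, pyPartition1]
    · have h' : PySem.Chars.endswith (v1 ++ [c]) [')'] = false := by
        rw [endswith_append_singleton]; simp [hc]
      simp only [loopA, h, Bool.false_eq_true, not_false_eq_true, if_true, if_pos,
        pyPartition1, if_neg hc]
      rw [ih (v1 ++ [c]) r v2 res ec h']
      by_cases hsep : (pyPartition1 ')' cs).2.1 = [] <;> simp [hsep]

-- phase 2: with v1 closed and v2 empty, r swallows characters up to the first '('
theorem phase2 (rest : List Char) : ∀ (node r : List Char) res ec,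
    PySem.Chars.endswith node [')'] = true →
    loopA rest node r [] res ec =
      (if (pyPartition1 '(' rest).2.1 = [] then (res, node, ec)
       else loopA (pyPartition1 '(' rest).2.2 node (r ++ (pyPartition1 '(' rest).1) ['('] res ec) := by
  induction rest with
  | nil => intro node r res ec _; simp [loopA, pyPartition1]
  | cons c rest ih =>
    intro node r res ec h
    by_cases hc : c = '('
    · subst hc
      simp [loopA, h, pyPartition1]
    · have hcond : ¬(c = '(' ∨ ([] : List Char) ≠ []) := by simp [hc]
      simp only [loopA, h, not_true_eq_false, if_false, if_neg hcond]
      rw [ih node (r ++ [c]) res ec h]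
      simp only [pyPartition1, if_neg hc]
      by_cases hsep : (pyPartition1 '(' rest).2.1 = [] <;> simp [hsep]

-- phase 3: v2 non-empty swallows characters up to the first ')', then the triple is emitted
theorem phase3 (rest : List Char) : ∀ (node r v2 : List Char) res ec,
    PySem.Chars.endswith node [')'] = true → v2 ≠ [] →
    loopA rest node r v2 res ec =
      (if (pyPartition1 ')' rest).2.1 = [] then (res, node, ec)
       else loopA (pyPartition1 ')' rest).2.2 (v2 ++ ((pyPartition1 ')' rest).1 ++ [')'])) [] []
              (res ++ [(node, r, v2 ++ ((pyPartition1 ')' rest).1 ++ [')']))]) (ec + 1)) := by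
  induction rest with
  | nil => intro node r v2 res ec _ _; simp [loopA, pyPartition1]
  | cons c rest ih =>
    intro node r v2 res ec h hv
    by_cases hc : c = ')'
    · subst hc
      simp [loopA, h, hv, pyPartition1]
    · simp only [loopA, h, not_true_eq_false, if_false, hv, or_true, if_true, ne_eq,
        if_neg hc, pyPartition1]
      rw [ih node r (v2 ++ [c]) res ec h (by simp)]
      by_cases hsep : (pyPartition1 ')' rest).2.1 = [] <;> simp [hsep]

-- A's machine started on a closed node equals B's partition loop
theorem loopA_eq_loopB (n : Nat) : ∀ (rest : List Char), rest.length ≤ n →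
    ∀ (node : List Char) res ec, PySem.Chars.endswith node [')'] = true →
    loopA rest node [] [] res ec = loopB node rest res ec := by
  induction n with
  | zero =>
    intro rest hlen node res ec h
    have : rest = [] := List.eq_nil_of_length_eq_zero (Nat.le_zero.mp hlen)
    subst this
    simp [loopA, loopB, pyPartition1]
  | succ n ih =>
    intro rest hlen node res ec h
    rcases hP : pyPartition1 '(' rest with ⟨pre, op, post⟩
    rw [phase2 rest node [] res ec h, loopB, hP]
    dsimp only
    by_cases h1 : op = []
    · simp [h1]
    · rw [if_neg h1, dif_neg h1]
      simp only [List.nil_append]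
      rcases hQ : pyPartition1 ')' post with ⟨mid, cl, post2⟩
      rw [phase3 post node pre ['('] res ec h (by simp), hQ]
      dsimp only
      by_cases h2 : cl = []
      · simp [h2]
      · rw [if_neg h2, dif_neg h2]
        have d1 := pyPartition1_sep_length '(' rest (by rw [hP]; exact h1)
        have d2 := pyPartition1_sep_length ')' post (by rw [hQ]; exact h2)
        rw [hP] at d1
        rw [hQ] at d2
        dsimp at d1 d2
        have hend : PySem.Chars.endswith ('(' :: (mid ++ [')'])) [')'] = true := by
          rw [show ('(' :: (mid ++ [')'])) = ('(' :: mid) ++ [')'] from by simp,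
            endswith_append_singleton]
          rfl
        simp only [List.singleton_append]
        rw [ih post2 (by omega) _ _ _ hend]

-- partition facts used by the piece-level argument
theorem pyPartition1_sep_nil (t : Char) : ∀ cs : List Char,
    (pyPartition1 t cs).2.1 = [] → (pyPartition1 t cs).2.2 = [] := by
  intro cs
  induction cs with
  | nil => simp [pyPartition1]
  | cons c cs ih =>
    by_cases h : c = t
    · simp [pyPartition1, h]
    · simpa [pyPartition1, h] using ih

theorem pyPartition1_sep_cases (t : Char) : ∀ cs : List Char,
    (pyPartition1 t cs).2.1 = [] ∨ (pyPartition1 t cs).2.1 = [t] := by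
  intro cs
  induction cs with
  | nil => simp [pyPartition1]
  | cons c cs ih =>
    by_cases h : c = t
    · simp [pyPartition1, h]
    · simpa [pyPartition1, h] using ih

-- per-piece equality of the two inner computations
theorem piece_eq (cs : List Char) (res : List (List Char × List Char × List Char)) :
    loopA cs [] [] [] res 0 =
      loopB ((pyPartition1 ')' cs).1 ++ (pyPartition1 ')' cs).2.1) (pyPartition1 ')' cs).2.2 res 0 := by
  have hcases := pyPartition1_sep_cases ')' cs
  have hnil := pyPartition1_sep_nil ')' cs
  rcases hP : pyPartition1 ')' cs with ⟨head, sp, rest⟩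
  rw [hP] at hcases hnil
  dsimp only at hcases hnil ⊢
  rw [phase1 cs [] [] [] res 0 (by decide), hP]
  dsimp only
  rcases hcases with hsp | hsp
  · subst hsp
    rw [if_pos rfl, hnil rfl]
    simp [loopB, pyPartition1]
  · subst hsp
    rw [if_neg (by simp)]
    simp only [List.nil_append, List.append_nil]
    exact loopA_eq_loopB rest.length rest le_rfl _ res 0
      (by rw [endswith_append_singleton]; rfl)

theorem step_eq : stepA = stepB := by
  funext acc p
  unfold stepA stepB
  dsimp only
  rw [piece_eq]
  simp [List.length_pos_iff]

theorem pattern2list_py_spec : Claim_equal_pattern2list_py := by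
  intro pattern _
  show pattern2list_py pattern = pattern2list_py_alt pattern
  unfold pattern2list_py pattern2list_py_alt
  rw [step_eq]
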